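-- pv_equiv track=rewrite | github.com/chr1chr1/AutoScribe | ClusterVoices.py | SplitTranscription
-- ===== SOURCE A (Python) =====
-- def SplitTranscription(transcription, groups):
--     voices = [[] for i in range(len(groups))] # a list (transcription) for each voice
--     #add note to  a voice based on which cluster it belongs to, one for each voice
--     #slower? iterating through transcriptions len(groups) times (but simpler to code than once through transcription)
--     for i in range(len(groups)):
--         for subdivision in transcription:
--             counter = 0
--             for note in subdivision:
--                 if note in groups[i]:
--                     voices[i].append(note)
--                     counter += 1
--                     break # should only be one matching note in chord per group by design
--             if counter == 0:
--                 voices[i].append("Rest")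
--     return voices
-- ===== SOURCE B (Python) =====
-- def SplitTranscription(transcription, groups):
--     # note -> ascending list of distinct group indices containing it (built once),
--     # then a single pass over the transcription building one row per chord
--     idx = {}
--     for g, group in enumerate(groups):
--         for note in group:
--             lst = idx.setdefault(note, [])
--             if not lst or lst[-1] != g:
--                 lst.append(g)
--     n = len(groups)
--
--     def make_row(subdivision):
--         row = [None] * n
--         remaining = n
--         for note in subdivision:
--             for g in idx.get(note, []):
--                 if row[g] is None:
--                     row[g] = note
--                     remaining -= 1
--             if remaining == 0:
--                 break
--         return row
--
--     rows = [make_row(sub) for sub in transcription]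
--     return [[row[g] if row[g] is not None else "Rest" for row in rows] for g in range(n)]
-- ===== Notes on version B (the rewrite author's own statement) =====
-- stated objective: alternative
-- what changed: B builds a note-to-group-indices dictionary once and makes a single pass over the transcription filling one row per chord (with an all-voices-filled early exit), transposing the rows at the end, instead of A's rescan of the whole transcription and of every chord's notes once per group; much faster on inputs without early matches, though not on ones where A's inner break fires immediately.
import Mathlib
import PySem

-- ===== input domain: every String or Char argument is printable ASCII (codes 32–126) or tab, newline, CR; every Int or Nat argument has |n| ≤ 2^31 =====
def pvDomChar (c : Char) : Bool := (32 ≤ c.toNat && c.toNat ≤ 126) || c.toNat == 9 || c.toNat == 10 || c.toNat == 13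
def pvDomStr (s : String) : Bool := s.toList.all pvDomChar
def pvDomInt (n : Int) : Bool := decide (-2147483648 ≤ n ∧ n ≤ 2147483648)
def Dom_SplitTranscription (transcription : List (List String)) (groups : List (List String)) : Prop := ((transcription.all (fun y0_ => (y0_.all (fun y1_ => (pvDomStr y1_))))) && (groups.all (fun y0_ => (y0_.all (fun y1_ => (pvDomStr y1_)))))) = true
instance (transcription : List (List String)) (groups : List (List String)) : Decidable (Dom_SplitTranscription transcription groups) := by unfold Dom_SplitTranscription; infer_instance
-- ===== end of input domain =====

-- B replaces A's per-group rescan of the whole transcription by a note→group-indices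
-- dict built once and a single pass over the transcription (objective: alternative).

-- ===== PORT A =====
-- the 'for note in subdivision: … break' loop of A: first note of the chord lying in grp
def pvFindA (grp : List String) : List String → Option String
  | [] => none
  | note :: rest => if note ∈ grp then some note else pvFindA grp rest

def SplitTranscription (transcription : List (List String)) (groups : List (List String)) : List (List String) :=
  let voices : List (List String) := groups.map (fun _ => [])
  (PySem.List.pyRange 0 groups.length 1).foldl
    (fun voices i =>
      -- groups[i]: i ranges over range(len(groups)), always in range
      let grp := (PySem.List.pyGet? groups i).getD []
      transcription.foldl
        (fun voices subdivision =>
          match pvFindA grp subdivision with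
          | some note => voices.modify i.toNat (fun l => l ++ [note])
          | none      => voices.modify i.toNat (fun l => l ++ ["Rest"]))
        voices)
    voices

-- ===== PORT B =====
-- 'lst = idx.setdefault(note, []); if not lst or lst[-1] != g: lst.append(g)'
def pvIdx (groups : List (List String)) : PySem.Dict String (List Int) :=
  (PySem.List.enumerate groups).foldl
    (fun d p => p.2.foldl
      (fun d note => d.modify note []
        (fun l => if l.getLast? = some p.1 then l else l ++ [p.1]))
      d)
    PySem.Dict.empty

-- 'if row[g] is None: row[g] = note; remaining -= 1' (g comes from enumerate, hence 0 ≤ g)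
def pvRowUpd (note : String) (st : List (Option String) × Int) (g : Int) :
    List (Option String) × Int :=
  match PySem.List.pyGet? st.1 g with
  | some none => (st.1.set g.toNat (some note), st.2 - 1)
  | _ => st

-- the 'for note in subdivision: … if remaining == 0: break' loop
def pvRowLoop (idx : PySem.Dict String (List Int)) :
    List String → List (Option String) × Int → List (Option String) × Int
  | [], st => st
  | note :: rest, st =>
    let st' := (idx.getD note []).foldl (pvRowUpd note) st
    if st'.2 = 0 then st' else pvRowLoop idx rest st'

def pvMakeRow (idx : PySem.Dict String (List Int)) (n : Nat) (subdivision : List String) :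
    List (Option String) :=
  (pvRowLoop idx subdivision (List.replicate n none, (n : Int))).1

def SplitTranscription_alt (transcription : List (List String)) (groups : List (List String)) : List (List String) :=
  let idx := pvIdx groups
  let n := groups.length
  let rows := transcription.map (pvMakeRow idx n)
  (List.range n).map (fun g => rows.map (fun row => (row.getD g none).getD "Rest"))

-- ===== PRECONDITION & SPEC =====
def Spec_SplitTranscription (transcription : List (List String)) (groups : List (List String)) (out : List (List String)) : Prop := out = SplitTranscription_alt transcription groups
instance (transcription : List (List String)) (groups : List (List String)) (out : List (List String)) : Decidable (Spec_SplitTranscription transcription groups out) := by unfold Spec_SplitTranscription; infer_instance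

-- ===== CLAIM (what is proved, stated in full; the proofs are below) =====
def Claim_equal_SplitTranscription : Prop := ∀ (transcription : List (List String)) (groups : List (List String)), Dom_SplitTranscription transcription groups → Spec_SplitTranscription transcription groups (SplitTranscription transcription groups)

-- ===== LEMMAS AND PROOFS =====

-- the common specification: column g is the per-subdivision first match in groups[g]
def pvCol (groups transcription : List (List String)) (g : Nat) : List String :=
  transcription.map (fun sub => (pvFindA (groups.getD g []) sub).getD "Rest")

def pvMatrix (groups transcription : List (List String)) : List (List String) :=
  (List.range groups.length).map (pvCol groups transcription)

lemma modify_modify_same {α : Type} (l : List α) (k : Nat) (f g : α → α) :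
    (l.modify k f).modify k g = l.modify k (fun x => g (f x)) := by
  apply List.ext_getElem <;> simp [List.getElem_modify]
  intro i h1 h2
  split <;> rfl

lemma A_inner (grp : List (String)) (tr : List (List String)) (k : Nat) :
    ∀ v : List (List String),
      tr.foldl (fun voices subdivision =>
          match pvFindA grp subdivision with
          | some note => voices.modify k (fun l => l ++ [note])
          | none      => voices.modify k (fun l => l ++ ["Rest"])) v
      = v.modify k (fun l => l ++ tr.map (fun sub => (pvFindA grp sub).getD "Rest")) := by
  induction tr with
  | nil =>
    intro v
    simp only [List.foldl_nil, List.map_nil]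
    apply List.ext_getElem (by simp)
    intro i h1 h2
    rw [List.getElem_modify]
    split <;> simp
  | cons sub rest ih =>
    intro v
    simp only [List.foldl_cons, List.map_cons]
    cases h : pvFindA grp sub with
    | none =>
      rw [ih, modify_modify_same]
      simp
    | some note =>
      rw [ih, modify_modify_same]
      simp

lemma fold_modify_length (F : Nat → List String) (is : List Nat) :
    ∀ v : List (List String),
      (is.foldl (fun v k => v.modify k (fun l => l ++ F k)) v).length = v.length := by
  induction is with
  | nil => intro v; rfl
  | cons i rest ih => intro v; simp [ih, List.length_modify]

lemma A_outer (F : Nat → List String) (is : List Nat) (hnd : is.Nodup) :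
    ∀ (v : List (List String)) (j : Nat) (hj : j < v.length),
      (is.foldl (fun v k => v.modify k (fun l => l ++ F k)) v)[j]'(by rw [fold_modify_length]; exact hj)
      = if j ∈ is then v[j] ++ F j else v[j] := by
  induction is with
  | nil => intro v j hj; simp
  | cons i rest ih =>
    simp only [List.nodup_cons] at hnd
    intro v j hj
    simp only [List.foldl_cons]
    rw [ih hnd.2 _ j (by rw [List.length_modify]; exact hj)]
    by_cases hij : i = j
    · subst hij
      simp [hnd.1]
    · simp [hij, List.mem_cons, Ne.symm hij]

lemma A_eq_matrix (tr gs : List (List String)) :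
    SplitTranscription tr gs = pvMatrix gs tr := by
  unfold SplitTranscription pvMatrix
  rw [PySem.List.pyRange_one, List.foldl_map]
  have hfun : (fun (v : List (List String)) (k : Nat) =>
      tr.foldl (fun voices subdivision =>
          match pvFindA ((PySem.List.pyGet? gs ((0 : Int) + ↑k)).getD []) subdivision with
          | some note => voices.modify ((0 : Int) + ↑k).toNat (fun l => l ++ [note])
          | none      => voices.modify ((0 : Int) + ↑k).toNat (fun l => l ++ ["Rest"])) v)
      = fun v k => v.modify k (fun l => l ++ (pvCol gs tr k)) := by
    funext v k
    rw [A_inner]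
    have h1 : ((0 : Int) + ↑k).toNat = k := by omega
    have h2 : (PySem.List.pyGet? gs ((0 : Int) + ↑k)).getD [] = gs.getD k [] := by
      rw [zero_add, PySem.List.pyGet?_natCast]
      simp [List.getD]
    rw [h1, h2]
    rfl
  simp only [zero_add] at hfun ⊢
  rw [hfun]
  apply List.ext_getElem
  · rw [fold_modify_length]; simp
  · intro j h1 h2
    rw [A_outer _ _ (List.nodup_range) _ j (by rw [fold_modify_length] at h1; simpa using h1)]
    have hj : j < gs.length := by simpa using h2
    simp [hj]

lemma idx_inner_mem (gidx : Int) (grp : List String) :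
    ∀ (d : PySem.Dict String (List Int)) (note : String) (g : Int),
      g ∈ (grp.foldl (fun d note' => d.modify note' []
              (fun l => if l.getLast? = some gidx then l else l ++ [gidx])) d).getD note []
      ↔ g ∈ d.getD note [] ∨ (g = gidx ∧ note ∈ grp) := by
  induction grp with
  | nil => intro d note g; simp
  | cons note' rest ih =>
    intro d note g
    simp only [List.foldl_cons]
    rw [ih]
    rw [PySem.Dict.getD_modify]
    by_cases h : note = note'
    · subst h
      simp only [if_true, List.mem_cons, true_or, and_true]
      by_cases hl : (d.getD note []).getLast? = some gidx
      · have hmem : gidx ∈ d.getD note [] := List.mem_of_getLast? hl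
        simp only [hl, if_true]
        constructor
        · tauto
        · rintro (hm | hg)
          · tauto
          · subst hg; tauto
      · simp only [hl, if_false, List.mem_append, List.mem_singleton]
        tauto
    · simp only [h, if_false, List.mem_cons]
      constructor
      · rintro (hm | ⟨hgi, hr⟩)
        · tauto
        · exact Or.inr ⟨hgi, Or.inr hr⟩
      · rintro (hm | ⟨hgi, (hn | hr)⟩)
        · tauto
        · exact hn.elim
        · exact Or.inr ⟨hgi, hr⟩

lemma idx_mem (gs : List (List String)) (note : String) (g : Int) :
    g ∈ (pvIdx gs).getD note []
    ↔ 0 ≤ g ∧ g.toNat < gs.length ∧ note ∈ gs.getD g.toNat [] := by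
  induction gs using List.reverseRecOn with
  | nil => simp [pvIdx, PySem.List.enumerate, PySem.Dict.getD, PySem.Dict.get?, PySem.Dict.empty]
  | append_singleton gs grp ih =>
    have hsplit : pvIdx (gs ++ [grp])
        = grp.foldl (fun d note' => d.modify note' []
            (fun l => if l.getLast? = some (gs.length : Int) then l else l ++ [(gs.length : Int)]))
            (pvIdx gs) := by
      unfold pvIdx
      rw [PySem.List.enumerate_append, List.foldl_append]
      simp [PySem.List.enumerate]
    have hL : ∀ k : Nat, k < gs.length → (gs ++ [grp]).getD k [] = gs.getD k [] := by
      intro k hk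
      simp [List.getD, List.getElem?_append_left hk]
    have hR : (gs ++ [grp]).getD gs.length [] = grp := by
      simp [List.getD]
    rw [hsplit, idx_inner_mem, ih]
    constructor
    · rintro (⟨hg0, hlt, hm⟩ | ⟨hgl, hm⟩)
      · exact ⟨hg0, by simp; omega, by rwa [hL _ hlt]⟩
      · have h0 : (0:Int) ≤ g := by omega
        have ht : g.toNat = gs.length := by omega
        refine ⟨h0, by simp; omega, ?_⟩
        rw [ht, hR]
        exact hm
    · rintro ⟨hg0, hlt, hm⟩
      simp only [List.length_append, List.length_singleton] at hlt
      by_cases h : g.toNat < gs.length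
      · exact Or.inl ⟨hg0, h, by rwa [hL _ h] at hm⟩
      · have ht : g.toNat = gs.length := by omega
        have hgl : g = (gs.length : Int) := by omega
        rw [ht, hR] at hm
        exact Or.inr ⟨hgl, hm⟩

lemma rowUpd_length (note : String) (st : List (Option String) × Int) (g : Int) :
    (pvRowUpd note st g).1.length = st.1.length := by
  unfold pvRowUpd
  split <;> simp

lemma rowUpd_fold_length (note : String) (glist : List Int) :
    ∀ st : List (Option String) × Int,
      (glist.foldl (pvRowUpd note) st).1.length = st.1.length := by
  induction glist with
  | nil => intro st; rfl
  | cons g rest ih => intro st; simp [ih, rowUpd_length]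

lemma rowUpd_get (note : String) (st : List (Option String) × Int) (g : Int) (hg0 : 0 ≤ g)
    (j : Nat) (hj : j < st.1.length) :
    (pvRowUpd note st g).1[j]?
    = some (if st.1[j]'hj = none ∧ (j : Int) = g then some note else st.1[j]'hj) := by
  unfold pvRowUpd
  rw [PySem.List.pyGet?_of_nonneg st.1 hg0]
  split
  · next heq =>
    rw [List.getElem?_eq_some_iff] at heq
    obtain ⟨hlt, hval⟩ := heq
    rw [List.getElem?_eq_getElem (by simpa using hj), List.getElem_set]
    by_cases hji : (j : Int) = g
    · have he : g.toNat = j := by omega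
      subst he
      simp [hval, hji]
    · have he : g.toNat ≠ j := by omega
      simp [he, hji]
  · next hne =>
    rw [List.getElem?_eq_getElem hj]
    by_cases hji : (j : Int) = g
    · have hjg : g.toNat = j := by omega
      have hsome : st.1[g.toNat]? = some (st.1[j]'hj) := by
        subst hjg
        exact List.getElem?_eq_getElem hj
      by_cases hnone : st.1[j]'hj = none
      · exact absurd (hnone ▸ hsome) (by exact fun h => hne h)
      · simp [hnone]
    · simp [hji]

lemma rowUpd_fold_get (note : String) (glist : List Int) (hg : ∀ g ∈ glist, 0 ≤ g) :
    ∀ (st : List (Option String) × Int) (j : Nat) (hj : j < st.1.length),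
      (glist.foldl (pvRowUpd note) st).1[j]?
      = some (if st.1[j]'hj = none ∧ (j : Int) ∈ glist then some note else st.1[j]'hj) := by
  induction glist with
  | nil =>
    intro st j hj
    simp [List.getElem?_eq_getElem hj]
  | cons g rest ih =>
    intro st j hj
    have hg0 : 0 ≤ g := hg g (List.mem_cons_self)
    have hrest : ∀ g' ∈ rest, 0 ≤ g' := fun g' h => hg g' (List.mem_cons_of_mem _ h)
    have hj1 : j < (pvRowUpd note st g).1.length := by rw [rowUpd_length]; exact hj
    have hchar : (pvRowUpd note st g).1[j]'hj1
        = if st.1[j]'hj = none ∧ (j : Int) = g then some note else st.1[j]'hj := by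
      have := rowUpd_get note st g hg0 j hj
      rw [List.getElem?_eq_getElem hj1] at this
      exact Option.some.inj this
    rw [List.foldl_cons, ih hrest _ j hj1, hchar]
    by_cases h1 : st.1[j]'hj = none <;> by_cases h2 : (j : Int) = g <;>
      by_cases h3 : (j : Int) ∈ rest <;>
      simp [h1, h2, h3]

-- the loop's counter always equals the number of still-unfilled (none) entries of the row
def pvInv (st : List (Option String) × Int) : Prop :=
  st.2 = (st.1.countP (fun o => o.isNone) : Int)

lemma countP_none_set (row : List (Option String)) (x : String) :
    ∀ (k : Nat), (hk : k < row.length) → row[k]'hk = none →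
      ((row.set k (some x)).countP (fun o => o.isNone) : Int)
      = (row.countP (fun o => o.isNone) : Int) - 1 := by
  induction row with
  | nil => intro k hk; simp at hk
  | cons o rest ih =>
    intro k hk hnone
    cases k with
    | zero =>
      simp only [List.getElem_cons_zero] at hnone
      subst hnone
      simp only [List.set_cons_zero, List.countP_cons]
      push_cast
      simp
    | succ k' =>
      simp only [List.set_cons_succ, List.countP_cons]
      push_cast
      have hih := ih k' (by simpa using hk) (by simpa using hnone)
      push_cast at hih
      rw [hih]
      ring

lemma rowUpd_inv (note : String) (st : List (Option String) × Int) (g : Int) (hg0 : 0 ≤ g)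
    (hinv : pvInv st) : pvInv (pvRowUpd note st g) := by
  unfold pvRowUpd
  rw [PySem.List.pyGet?_of_nonneg st.1 hg0]
  split
  · next heq =>
    rw [List.getElem?_eq_some_iff] at heq
    obtain ⟨hlt, hval⟩ := heq
    unfold pvInv at hinv ⊢
    simp only
    rw [countP_none_set st.1 note g.toNat hlt hval]
    omega
  · exact hinv

lemma rowUpd_fold_inv (note : String) (glist : List Int) (hg : ∀ g ∈ glist, 0 ≤ g) :
    ∀ st : List (Option String) × Int, pvInv st → pvInv (glist.foldl (pvRowUpd note) st) := by
  induction glist with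
  | nil => intro st h; exact h
  | cons g rest ih =>
    intro st h
    exact ih (fun g' h' => hg g' (List.mem_cons_of_mem _ h')) _
      (rowUpd_inv note st g (hg g (List.mem_cons_self)) h)

lemma inv_zero_no_none (st : List (Option String) × Int) (hinv : pvInv st) (h0 : st.2 = 0)
    (j : Nat) (hj : j < st.1.length) : st.1[j]'hj ≠ none := by
  unfold pvInv at hinv
  have hcount : st.1.countP (fun o => o.isNone) = 0 := by omega
  rw [List.countP_eq_zero] at hcount
  intro hn
  have := hcount (st.1[j]'hj) (List.getElem_mem hj)
  rw [hn] at this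
  simp at this

lemma rowLoop_get (gs : List (List String)) (sub : List String) :
    ∀ (st : List (Option String) × Int) (hinv : pvInv st) (hlen : st.1.length = gs.length)
      (j : Nat) (hj : j < st.1.length),
      (pvRowLoop (pvIdx gs) sub st).1[j]?
      = some ((st.1[j]'hj).or (pvFindA (gs.getD j []) sub)) := by
  induction sub with
  | nil =>
    intro st hinv hlen j hj
    cases h : st.1[j]'hj <;>
      simp [pvRowLoop, pvFindA, Option.or, h, List.getElem?_eq_getElem hj]
  | cons note rest ih =>
    intro st hinv hlen j hj
    rw [pvRowLoop]
    have hglist : ∀ g' ∈ (pvIdx gs).getD note [], 0 ≤ g' := by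
      intro g' h; exact ((idx_mem gs note g').mp h).1
    have hj1 : j < (((pvIdx gs).getD note []).foldl (pvRowUpd note) st).1.length := by
      rw [rowUpd_fold_length]; exact hj
    have hchar : (((pvIdx gs).getD note []).foldl (pvRowUpd note) st).1[j]'hj1
        = if st.1[j]'hj = none ∧ (j : Int) ∈ (pvIdx gs).getD note []
            then some note else st.1[j]'hj := by
      have := rowUpd_fold_get note _ hglist st j hj
      rw [List.getElem?_eq_getElem hj1] at this
      exact Option.some.inj this
    have hmem : ((j : Int) ∈ (pvIdx gs).getD note []) ↔ note ∈ gs.getD j [] := by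
      rw [idx_mem]
      constructor
      · rintro ⟨_, _, hm⟩
        simpa using hm
      · intro hm
        exact ⟨by omega, by simpa [hlen] using hj, by simpa using hm⟩
    have hinv1 : pvInv (((pvIdx gs).getD note []).foldl (pvRowUpd note) st) :=
      rowUpd_fold_inv note _ hglist st hinv
    split
    · next h0 =>
      have hnn := inv_zero_no_none _ hinv1 h0 j hj1
      rw [hchar] at hnn
      rw [List.getElem?_eq_getElem hj1, hchar]
      simp only [hmem] at hnn ⊢
      rcases hrj : st.1[j]'hj with _ | x <;> by_cases h2 : note ∈ gs.getD j [] <;>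
        simp_all [pvFindA, Option.or, List.getD]
    · next h0 =>
      rw [ih _ hinv1 (by rw [rowUpd_fold_length]; exact hlen) j hj1, hchar]
      simp only [hmem]
      rcases hrj : st.1[j]'hj with _ | x <;> by_cases h2 : note ∈ gs.getD j [] <;>
        simp_all [pvFindA, Option.or, List.getD]

lemma B_eq_matrix (tr gs : List (List String)) :
    SplitTranscription_alt tr gs = pvMatrix gs tr := by
  unfold SplitTranscription_alt pvMatrix
  apply List.ext_getElem (by simp)
  intro g h1 h2
  simp only [List.getElem_map, List.getElem_range]
  have hg : g < gs.length := by simpa using h1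
  have cell : ∀ sub : List String,
      ((pvMakeRow (pvIdx gs) gs.length sub).getD g none).getD "Rest"
      = (pvFindA (gs.getD g []) sub).getD "Rest" := by
    intro sub
    have hget : (pvMakeRow (pvIdx gs) gs.length sub)[g]?
        = some (((List.replicate gs.length (none : Option String))[g]'(by simpa using hg)).or
            (pvFindA (gs.getD g []) sub)) := by
      unfold pvMakeRow
      exact rowLoop_get gs sub _ (by unfold pvInv; simp [List.countP_replicate]) (by simp) g (by simpa using hg)
    have hrepl : (pvMakeRow (pvIdx gs) gs.length sub).getD g none
        = (pvFindA (gs.getD g []) sub) := by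
      rw [List.getD_eq_getElem?_getD, hget]
      simp [Option.or]
    rw [hrepl]
  unfold pvCol
  rw [List.map_map]
  exact List.map_congr_left (fun sub _ => cell sub)

-- ===== VERDICT (by name: the statement is the Claim_ definition above) =====
theorem SplitTranscription_spec : Claim_equal_SplitTranscription := by
  intro tr gs _
  unfold Spec_SplitTranscription
  rw [A_eq_matrix, B_eq_matrix]
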